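-- pv_equiv track=rewrite | github.com/Shloub/metalang | out/fibo.py | fibo0
-- ===== SOURCE A (Python) =====
-- def fibo0(a, b, i):
--     out0 = 0
--     a2 = a
--     b2 = b
--     for j in range(0, 1 + i + 1):
--         out0 += a2
--         tmp = b2
--         b2 += a2
--         a2 = tmp
--     return out0
-- ===== SOURCE B (Python) =====
-- def fibo0(a, b, i):
--     # Closed form via fast doubling: the loop runs n = i + 2 times and its
--     # sum equals F(n)*a + F(n+1)*b - b (standard Fibonacci-like sum identity).
--     n = i + 2
--     if n <= 0:
--         return 0
--
--     def fib_pair(m):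
--         # returns (F(m), F(m+1)) by fast doubling
--         if m == 0:
--             return (0, 1)
--         f, g = fib_pair(m >> 1)
--         c = f * (2 * g - f)
--         d = f * f + g * g
--         if m & 1:
--             return (d, c + d)
--         return (c, d)
--
--     f, g = fib_pair(n)
--     return f * a + g * b - b
-- ===== Notes on version B (the rewrite author's own statement) =====
-- stated objective: faster
-- what changed: Replaced the O(i) accumulation loop by the closed form F(n)*a + F(n+1)*b - b with F computed by recursive fast doubling, n = i + 2.
import Mathlib
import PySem

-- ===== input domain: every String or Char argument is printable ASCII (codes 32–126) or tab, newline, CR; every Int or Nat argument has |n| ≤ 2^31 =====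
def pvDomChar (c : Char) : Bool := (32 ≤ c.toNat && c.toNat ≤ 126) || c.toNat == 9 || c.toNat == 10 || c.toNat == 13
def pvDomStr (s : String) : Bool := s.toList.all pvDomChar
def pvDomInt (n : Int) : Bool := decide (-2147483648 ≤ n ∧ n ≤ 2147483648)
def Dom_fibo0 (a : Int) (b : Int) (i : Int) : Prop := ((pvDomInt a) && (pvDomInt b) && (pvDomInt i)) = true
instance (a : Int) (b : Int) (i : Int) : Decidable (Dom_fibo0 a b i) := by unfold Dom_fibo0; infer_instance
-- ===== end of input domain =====

-- B replaces A's O(i) accumulation loop by the closed form F(n)*a + F(n+1)*b - b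
-- (n = i + 2) with F computed by recursive fast doubling: objective = faster (asymptotic).

-- ===== PORT A =====
-- literal port of A's loop: state (out0, a2, b2), one step per element of range(0, 1+i+1)
def fibo0 (a : Int) (b : Int) (i : Int) : Int :=
  ((PySem.List.pyRange 0 (1 + i + 1) 1).foldl
    (fun (st : Int × Int × Int) _ =>
      (st.1 + st.2.1, st.2.2, st.2.2 + st.2.1)) (0, a, b)).1

-- ===== PORT B =====
-- fast doubling: fibPair m = (F(m), F(m+1)), exactly Source B's fib_pair
def fibPair (m : Nat) : Int × Int :=
  if h : m = 0 then (0, 1)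
  else
    let p := fibPair (m / 2)
    let c := p.1 * (2 * p.2 - p.1)
    let d := p.1 * p.1 + p.2 * p.2
    if m % 2 = 1 then (d, c + d) else (c, d)
decreasing_by exact Nat.div_lt_self (Nat.pos_of_ne_zero h) (by norm_num)

def fibo0_alt (a : Int) (b : Int) (i : Int) : Int :=
  let n := i + 2
  if n ≤ 0 then 0
  else
    let p := fibPair n.toNat
    p.1 * a + p.2 * b - b

-- ===== PRECONDITION & SPEC =====
def Spec_fibo0 (a : Int) (b : Int) (i : Int) (out : Int) : Prop := out = fibo0_alt a b i
instance (a : Int) (b : Int) (i : Int) (out : Int) : Decidable (Spec_fibo0 a b i out) := by unfold Spec_fibo0; infer_instance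

-- ===== CLAIM (what is proved, stated in full; the proofs are below) =====
def Claim_equal_fibo0 : Prop := ∀ (a : Int) (b : Int) (i : Int), Dom_fibo0 a b i → Spec_fibo0 a b i (fibo0 a b i)

-- ===== LEMMAS AND PROOFS =====

theorem fibPair_eq (m : Nat) : fibPair m = ((Nat.fib m : Int), (Nat.fib (m + 1) : Int)) := by
  induction m using Nat.strong_induction_on with
  | _ m ih =>
    rw [fibPair]
    by_cases h : m = 0
    · simp [h]
    · have hlt : m / 2 < m := Nat.div_lt_self (Nat.pos_of_ne_zero h) (by norm_num)
      rw [ih (m / 2) hlt]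
      have hle : Nat.fib (m / 2) ≤ 2 * Nat.fib (m / 2 + 1) :=
        le_trans Nat.fib_le_fib_succ (by omega)
      by_cases hp : m % 2 = 1
      · obtain ⟨k, hk⟩ : ∃ k, m = 2 * k + 1 := ⟨m / 2, by omega⟩
        rw [show m / 2 = k by omega] at hle ⊢
        simp only [hp, if_true, dif_neg h]
        rw [hk]
        have hc : (Nat.fib (2 * k) : Int)
            = (Nat.fib k : Int) * (2 * (Nat.fib (k + 1) : Int) - (Nat.fib k : Int)) := by
          rw [Nat.fib_two_mul, Nat.cast_mul, Nat.cast_sub hle]; push_cast; ring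
        have hd : (Nat.fib (2 * k + 1) : Int)
            = (Nat.fib k : Int) * (Nat.fib k : Int)
              + (Nat.fib (k + 1) : Int) * (Nat.fib (k + 1) : Int) := by
          rw [Nat.fib_two_mul_add_one]; push_cast; ring
        have hsum : (Nat.fib (2 * k + 1 + 1) : Int)
            = (Nat.fib (2 * k) : Int) + (Nat.fib (2 * k + 1) : Int) := by
          rw [Nat.fib_add_two]; push_cast; ring
        refine Prod.ext ?_ ?_
        · simp only [hd]
        · simp only [hsum, hc, hd]
      · obtain ⟨k, hk⟩ : ∃ k, m = 2 * k := ⟨m / 2, by omega⟩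
        rw [show m / 2 = k by omega] at hle ⊢
        simp only [hp, if_false, dif_neg h]
        rw [hk]
        have hc : (Nat.fib (2 * k) : Int)
            = (Nat.fib k : Int) * (2 * (Nat.fib (k + 1) : Int) - (Nat.fib k : Int)) := by
          rw [Nat.fib_two_mul, Nat.cast_mul, Nat.cast_sub hle]; push_cast; ring
        have hd : (Nat.fib (2 * k + 1) : Int)
            = (Nat.fib k : Int) * (Nat.fib k : Int)
              + (Nat.fib (k + 1) : Int) * (Nat.fib (k + 1) : Int) := by
          rw [Nat.fib_two_mul_add_one]; push_cast; ring
        refine Prod.ext ?_ ?_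
        · simp only [hc]
        · simp only [hd]

-- iterating A's loop body n times (the range values are unused by the body)
def loopN : Nat → Int × Int × Int → Int × Int × Int
  | 0, st => st
  | n + 1, st => loopN n (st.1 + st.2.1, st.2.2, st.2.2 + st.2.1)

theorem foldl_eq_loopN (l : List Int) (st : Int × Int × Int) :
    l.foldl (fun (st : Int × Int × Int) _ =>
      (st.1 + st.2.1, st.2.2, st.2.2 + st.2.1)) st = loopN l.length st := by
  induction l generalizing st with
  | nil => rfl
  | cons x xs ih => simp [List.foldl, loopN, ih]

theorem loopN_val (n : Nat) : ∀ o a b : Int,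
    (loopN n (o, a, b)).1 = o + (Nat.fib n : Int) * a + (Nat.fib (n + 1) : Int) * b - b := by
  induction n with
  | zero => intro o a b; simp [loopN]
  | succ n ih =>
    intro o a b
    simp only [loopN]
    rw [ih]
    rw [Nat.fib_add_two]
    push_cast
    ring

-- ===== VERDICT (by name: the statement is the Claim_ definition above) =====
theorem fibo0_spec : Claim_equal_fibo0 := by
  intro a b i _
  unfold Spec_fibo0 fibo0 fibo0_alt
  by_cases h : i + 2 ≤ 0
  · rw [PySem.List.pyRange_one_eq_nil (by omega)]
    simp [h]
  · rw [foldl_eq_loopN, PySem.List.length_pyRange_one]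
    have hlen : (1 + i + 1 - 0).toNat = (i + 2).toNat := by omega
    rw [hlen, loopN_val]
    simp only [if_neg h, fibPair_eq]
    ring
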